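-- pv_equiv track=rewrite | github.com/halimyu/Python1 | HW17/fibonacciOrder.py | fibonacciOrder
-- ===== SOURCE A (Python) =====
-- def fibonacciOrder(N, K):
--
--     fibonacciList = [1]
--
--     fibonacci = 0
--     if K == 0:
--         return fibonacciList[0]
--     elif (K >= 2 and K <= N):
--         for i in range(1, K):
--             for j in range(0, i):
--                 fibonacci += fibonacciList[j]
--             fibonacciList.append(fibonacci)
--             fibonacci = 0
--     else:
--         for i in range(1, N):
--             for j in range(0, i):
--                 fibonacci += fibonacciList[j]
--             fibonacciList.append(fibonacci)
--             fibonacci = 0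
--
--         for i in range(N, K):
--             for j in range(i-N, i):
--                 fibonacci += fibonacciList[j]
--             fibonacciList.append(fibonacci)
--             fibonacci = 0
--
--
--     return fibonacciList[K-1]
-- ===== SOURCE B (Python) =====
-- def fibonacciOrder(N, K):
--     if K <= 1:
--         return 1
--     a = [1]
--     s = 1  # s = sum of the last min(len(a), N) terms of a
--     for i in range(1, K):
--         a.append(s)
--         s += a[i]
--         if i >= N:
--             s -= a[i - N]
--     return a[K - 1]
-- ===== Notes on version B (the rewrite author's own statement) =====
-- stated objective: faster
-- what changed: Replaces A's three-branch structure with re-summing inner loops (sum of all / last N previous terms recomputed at every step) by a single O(K) loop maintaining an incremental sliding-window running sum.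
-- outside the precondition, e.g. on fibonacciOrder(5, -1): A returns 4, B returns 1; on fibonacciOrder(0, 3): A returns 0, B returns 1
import Mathlib
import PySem

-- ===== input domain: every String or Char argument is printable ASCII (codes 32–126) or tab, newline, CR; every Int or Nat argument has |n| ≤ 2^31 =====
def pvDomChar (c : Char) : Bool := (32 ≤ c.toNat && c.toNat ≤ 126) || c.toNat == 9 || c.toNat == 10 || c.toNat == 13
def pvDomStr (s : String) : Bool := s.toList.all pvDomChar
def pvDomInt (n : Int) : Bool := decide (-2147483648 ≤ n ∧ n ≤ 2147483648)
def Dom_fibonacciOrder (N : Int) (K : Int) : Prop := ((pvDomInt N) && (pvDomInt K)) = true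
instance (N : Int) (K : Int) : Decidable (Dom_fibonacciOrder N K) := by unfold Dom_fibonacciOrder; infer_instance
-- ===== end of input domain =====

-- B replaces A's re-summing inner loops by a single loop maintaining the window sum incrementally (objective: faster).

-- ===== PORT A =====
-- step of A's "sum all previous terms" loops (the 2 ≤ K ≤ N branch and the first else-loop share this body)
def pvStepAll (st : List Int × Int) (i : Int) : List Int × Int :=
  let fib := (PySem.List.pyRange 0 i 1).foldl (fun f j => f + PySem.List.pyGetD st.1 j 0) st.2
  (st.1 ++ [fib], 0)

-- step of A's window loop: sums fibonacciList[i-N .. i-1]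
def pvStepWin (N : Int) (st : List Int × Int) (i : Int) : List Int × Int :=
  let fib := (PySem.List.pyRange (i - N) i 1).foldl (fun f j => f + PySem.List.pyGetD st.1 j 0) st.2
  (st.1 ++ [fib], 0)

def fibonacciOrder (N : Int) (K : Int) : Int :=
  let fibonacciList : List Int := [1]
  if K = 0 then
    PySem.List.pyGetD fibonacciList 0 0
  else if 2 ≤ K ∧ K ≤ N then
    let st := (PySem.List.pyRange 1 K 1).foldl pvStepAll (fibonacciList, 0)
    PySem.List.pyGetD st.1 (K - 1) 0
  else
    let st1 := (PySem.List.pyRange 1 N 1).foldl pvStepAll (fibonacciList, 0)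
    let st2 := (PySem.List.pyRange N K 1).foldl (pvStepWin N) st1
    PySem.List.pyGetD st2.1 (K - 1) 0

-- ===== PORT B =====
-- one step of B: append the running window sum, then update it incrementally
def pvStepB (N : Int) (st : List Int × Int) (i : Int) : List Int × Int :=
  let a := st.1 ++ [st.2]
  let s1 := st.2 + PySem.List.pyGetD a i 0
  let s2 := if N ≤ i then s1 - PySem.List.pyGetD a (i - N) 0 else s1
  (a, s2)

def fibonacciOrder_alt (N : Int) (K : Int) : Int :=
  if K ≤ 1 then 1
  else
    let st := (PySem.List.pyRange 1 K 1).foldl (pvStepB N) ([1], 1)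
    PySem.List.pyGetD st.1 (K - 1) 0

-- ===== PRECONDITION & SPEC =====
-- Pre_ restricts to the natural domain N ≥ 1 (an order-N sequence) and K ≥ 0 (a valid position): outside it
-- A either raises IndexError or returns accidental values of negative-index wraparound / degenerate windows.
def Pre_fibonacciOrder (N : Int) (K : Int) : Prop := 1 ≤ N ∧ 0 ≤ K
instance (N : Int) (K : Int) : Decidable (Pre_fibonacciOrder N K) := by unfold Pre_fibonacciOrder; infer_instance
def pvWitness_fibonacciOrder : Int × Int := (3, 7)
def Spec_fibonacciOrder (N : Int) (K : Int) (out : Int) : Prop := out = fibonacciOrder_alt N K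
instance (N : Int) (K : Int) (out : Int) : Decidable (Spec_fibonacciOrder N K out) := by unfold Spec_fibonacciOrder; infer_instance

-- ===== CLAIM (what is proved, stated in full; the proofs are below) =====
def Claim_equal_fibonacciOrder : Prop := ∀ (N : Int) (K : Int), Dom_fibonacciOrder N K → Pre_fibonacciOrder N K → Spec_fibonacciOrder N K (fibonacciOrder N K)

-- ===== LEMMAS AND PROOFS =====

-- window sum: sum of the last min(length, N) entries
def pvW (N : Int) (l : List Int) : Int := (l.drop (l.length - N.toNat)).sum

-- the sequence both programs build: a(0) = 1, a(k+1) = sum of the last min(k+1, N) terms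
def pvBuild (N : Int) : Nat → List Int
  | 0 => [1]
  | n + 1 => pvBuild N n ++ [pvW N (pvBuild N n)]

theorem pvBuild_zero (N : Int) : pvBuild N 0 = [1] := rfl

theorem pvBuild_succ (N : Int) (n : Nat) :
    pvBuild N (n + 1) = pvBuild N n ++ [pvW N (pvBuild N n)] := rfl

theorem pvBuild_length (N : Int) (n : Nat) : (pvBuild N n).length = n + 1 := by
  induction n with
  | zero => rfl
  | succ n ih => simp [pvBuild_succ, ih]

theorem pvBuild_cons (N : Int) (n : Nat) : ∃ t, pvBuild N n = 1 :: t := by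
  induction n with
  | zero => exact ⟨[], rfl⟩
  | succ n ih =>
    obtain ⟨t, ht⟩ := ih
    exact ⟨t ++ [pvW N (pvBuild N n)], by simp [pvBuild_succ, ht]⟩

theorem pvW_eq_sum (N : Int) (l : List Int) (h : l.length ≤ N.toNat) : pvW N l = l.sum := by
  simp [pvW, Nat.sub_eq_zero_of_le h]

-- the inner fold of A's "sum all" step is the list sum
theorem pvSum_all (l : List Int) (c : Int) (i : Int) (hi : i = (l.length : Int)) :
    (PySem.List.pyRange 0 i 1).foldl (fun f j => f + PySem.List.pyGetD l j 0) c = c + l.sum := by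
  subst hi
  have h := PySem.List.foldl_pyRange_zero_pyGetD' l 0 (fun acc x => acc + x) c
  have h2 := PySem.List.foldl_add l (fun x => x) c
  simp only [List.map_id_fun', id] at h2
  simpa using h.trans (by simpa using h2)

-- the inner fold of A's window step is the sum of a suffix
theorem pvSum_win (l : List Int) (c : Int) (a : Int) (i : Int) (ha : 0 ≤ a) (hi : i = (l.length : Int)) :
    (PySem.List.pyRange a i 1).foldl (fun f j => f + PySem.List.pyGetD l j 0) c
      = c + (l.drop a.toNat).sum := by
  subst hi
  have h := PySem.List.foldl_pyRange_pyGetD' l 0 (fun acc x => acc + x) c ha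
  have h2 := PySem.List.foldl_add (l.drop a.toNat) (fun x => x) c
  simp only [List.map_id_fun', id] at h2
  simpa using h.trans (by simpa using h2)

-- sliding-window identities for pvW under an append
theorem pvW_append_full (N : Int) (l : List Int) (s : Int) (h1 : 1 ≤ N.toNat)
    (hfull : N.toNat ≤ l.length) :
    pvW N (l ++ [s]) = pvW N l + s - l.getD (l.length - N.toNat) 0 := by
  have hj : l.length - N.toNat < l.length := by omega
  have hd : (l ++ [s]).length - N.toNat = (l.length - N.toNat) + 1 := by
    simp only [List.length_append, List.length_cons, List.length_nil]; omega
  unfold pvW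
  rw [hd, List.drop_append_of_le_length (by omega), List.sum_append,
    List.drop_eq_getElem_cons hj, List.sum_cons, List.getD_eq_getElem l 0 hj]
  simp only [List.sum_cons, List.sum_nil]
  ring

theorem pvW_append_small (N : Int) (l : List Int) (s : Int) (hsmall : l.length + 1 ≤ N.toNat) :
    pvW N (l ++ [s]) = pvW N l + s := by
  rw [pvW_eq_sum N (l ++ [s]) (by simp only [List.length_append, List.length_cons, List.length_nil]; omega),
    pvW_eq_sum N l (by omega), List.sum_append]
  simp

theorem pvStepAll_build (N : Int) (n : Nat) (h : (n : Int) + 1 ≤ N) :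
    pvStepAll (pvBuild N n, 0) (1 + (n : Int)) = (pvBuild N (n + 1), 0) := by
  have hlen : ((pvBuild N n).length : Int) = 1 + (n : Int) := by
    rw [pvBuild_length]; push_cast; ring
  have hW : pvW N (pvBuild N n) = (pvBuild N n).sum :=
    pvW_eq_sum N (pvBuild N n) (by rw [pvBuild_length]; omega)
  have hfib : (PySem.List.pyRange 0 (1 + (n : Int)) 1).foldl
      (fun f j => f + PySem.List.pyGetD (pvBuild N n) j 0) 0 = pvW N (pvBuild N n) := by
    rw [pvSum_all (pvBuild N n) 0 (1 + (n : Int)) hlen.symm, zero_add]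
    exact hW.symm
  simp only [pvStepAll]
  rw [hfib, pvBuild_succ]

theorem pvA_all_loop (N : Int) (n : Nat) (h : (n : Int) ≤ N) :
    (PySem.List.pyRange 1 (1 + (n : Int)) 1).foldl pvStepAll ([1], 0) = (pvBuild N n, 0) := by
  revert h
  induction n with
  | zero =>
    intro _
    rw [show (1 + ((0 : Nat) : Int)) = 1 by simp, PySem.List.pyRange_one_eq_nil le_rfl,
      List.foldl_nil]
    simp [pvBuild_zero]
  | succ n ih =>
    intro h
    have hc : (1 + ((n + 1 : Nat) : Int)) = (1 + (n : Int)) + 1 := by push_cast; ring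
    rw [hc, PySem.List.pyRange_one_succ_right (by omega), List.foldl_append,
      ih (by omega), List.foldl_cons, List.foldl_nil]
    exact pvStepAll_build N n (by omega)

theorem pvStepWin_build (N : Int) (hN : 1 ≤ N) (n : Nat) (hn : N ≤ (n : Int) + 1) :
    pvStepWin N (pvBuild N n, 0) (1 + (n : Int)) = (pvBuild N (n + 1), 0) := by
  have hL : (pvBuild N n).length = n + 1 := pvBuild_length N n
  have hlen : ((pvBuild N n).length : Int) = 1 + (n : Int) := by rw [hL]; push_cast; ring
  have ha : (0 : Int) ≤ 1 + (n : Int) - N := by omega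
  have htn : (1 + (n : Int) - N).toNat = (pvBuild N n).length - N.toNat := by rw [hL]; omega
  have hfib : (PySem.List.pyRange (1 + (n : Int) - N) (1 + (n : Int)) 1).foldl
      (fun f j => f + PySem.List.pyGetD (pvBuild N n) j 0) 0 = pvW N (pvBuild N n) := by
    rw [pvSum_win (pvBuild N n) 0 (1 + (n : Int) - N) (1 + (n : Int)) ha hlen.symm, zero_add, htn]
    rfl
  simp only [pvStepWin]
  rw [hfib, pvBuild_succ]

theorem pvA_win_loop (N : Int) (hN : 1 ≤ N) (n₀ : Nat) (h₀ : (n₀ : Int) = N - 1) (m : Nat) :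
    (PySem.List.pyRange N (N + (m : Int)) 1).foldl (pvStepWin N) (pvBuild N n₀, 0)
      = (pvBuild N (n₀ + m), 0) := by
  induction m with
  | zero =>
    rw [show (N + ((0 : Nat) : Int)) = N by simp, PySem.List.pyRange_one_eq_nil le_rfl,
      List.foldl_nil]
    simp
  | succ m ih =>
    have hc : (N + ((m + 1 : Nat) : Int)) = (N + (m : Int)) + 1 := by push_cast; ring
    rw [hc, PySem.List.pyRange_one_succ_right (by omega), List.foldl_append, ih,
      List.foldl_cons, List.foldl_nil]
    have hi : (N + (m : Int)) = 1 + ((n₀ + m : Nat) : Int) := by push_cast; omega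
    rw [hi]
    exact pvStepWin_build N hN (n₀ + m) (by push_cast; omega)

theorem pvStepB_build (N : Int) (hN : 1 ≤ N) (n : Nat) :
    pvStepB N (pvBuild N n, pvW N (pvBuild N n)) (1 + (n : Int))
      = (pvBuild N (n + 1), pvW N (pvBuild N (n + 1))) := by
  have hL : (pvBuild N n).length = n + 1 := pvBuild_length N n
  have hge1 : 1 ≤ N.toNat := by omega
  have hget_i : PySem.List.pyGetD (pvBuild N n ++ [pvW N (pvBuild N n)]) (1 + (n : Int)) 0
      = pvW N (pvBuild N n) := by
    rw [show (1 + (n : Int)) = ((n + 1 : Nat) : Int) by push_cast; ring,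
      PySem.List.pyGetD_natCast, List.getD_eq_getElem?_getD,
      List.getElem?_append_right (by omega)]
    simp [hL]
  by_cases hNi : N ≤ 1 + (n : Int)
  · -- the window is full: the element that leaves is subtracted
    have hfull : N.toNat ≤ (pvBuild N n).length := by omega
    have hget_j : PySem.List.pyGetD (pvBuild N n ++ [pvW N (pvBuild N n)]) (1 + (n : Int) - N) 0
        = (pvBuild N n).getD ((pvBuild N n).length - N.toNat) 0 := by
      rw [show (1 + (n : Int) - N) = (((pvBuild N n).length - N.toNat : Nat) : Int) by rw [hL]; omega,
        PySem.List.pyGetD_natCast, List.getD_eq_getElem?_getD, List.getD_eq_getElem?_getD,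
        List.getElem?_append_left (by omega)]
    have h2 : pvW N (pvBuild N n) + pvW N (pvBuild N n)
        - (pvBuild N n).getD ((pvBuild N n).length - N.toNat) 0
        = pvW N (pvBuild N n ++ [pvW N (pvBuild N n)]) := by
      rw [pvW_append_full N (pvBuild N n) (pvW N (pvBuild N n)) hge1 hfull]
    simp only [pvStepB, if_pos hNi, hget_i, hget_j, pvBuild_succ, Prod.mk.injEq]
    exact ⟨trivial, h2⟩
  · -- the window is not yet full: the new sum is the whole sum
    have hsmall : (pvBuild N n).length + 1 ≤ N.toNat := by omega
    have h2 : pvW N (pvBuild N n) + pvW N (pvBuild N n)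
        = pvW N (pvBuild N n ++ [pvW N (pvBuild N n)]) := by
      rw [pvW_append_small N (pvBuild N n) (pvW N (pvBuild N n)) hsmall]
    simp only [pvStepB, if_neg hNi, hget_i, pvBuild_succ, Prod.mk.injEq]
    exact ⟨trivial, h2⟩

theorem pvB_loop (N : Int) (hN : 1 ≤ N) (n : Nat) :
    (PySem.List.pyRange 1 (1 + (n : Int)) 1).foldl (pvStepB N) ([1], 1)
      = (pvBuild N n, pvW N (pvBuild N n)) := by
  induction n with
  | zero =>
    have h1 : pvW N ([1] : List Int) = 1 := by
      have h := pvW_eq_sum N [1] (by simp only [List.length_cons, List.length_nil]; omega)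
      simpa using h
    rw [show (1 + ((0 : Nat) : Int)) = 1 by simp, PySem.List.pyRange_one_eq_nil le_rfl,
      List.foldl_nil]
    simp [pvBuild_zero, h1]
  | succ n ih =>
    have hc : (1 + ((n + 1 : Nat) : Int)) = (1 + (n : Int)) + 1 := by push_cast; ring
    rw [hc, PySem.List.pyRange_one_succ_right (by omega), List.foldl_append, ih,
      List.foldl_cons, List.foldl_nil]
    exact pvStepB_build N hN n

-- ===== VERDICT (by name: the statement is the Claim_ definition above) =====
theorem fibonacciOrder_spec : Claim_equal_fibonacciOrder := by
  intro N K _ hPre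
  obtain ⟨hN, hK⟩ := hPre
  unfold Spec_fibonacciOrder fibonacciOrder fibonacciOrder_alt
  by_cases h0 : K = 0
  · subst h0
    simp [PySem.List.pyGetD_zero_cons]
  · by_cases h1 : K = 1
    · subst h1
      have hA1 := pvA_all_loop N (N - 1).toNat (by omega)
      rw [show (1 + (((N - 1).toNat : Nat) : Int)) = N by omega] at hA1
      simp only [if_neg h0, if_neg (by omega : ¬((2 : Int) ≤ 1 ∧ (1 : Int) ≤ N)),
        if_pos (le_refl (1 : Int))]
      obtain ⟨t, ht⟩ := pvBuild_cons N (N - 1).toNat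
      rw [hA1, PySem.List.pyRange_one_eq_nil hN, List.foldl_nil, ht]
      simp [PySem.List.pyGetD_zero_cons]
    · have hK2 : 2 ≤ K := by omega
      simp only [if_neg h0, if_neg (by omega : ¬(K ≤ (1 : Int)))]
      have hB := pvB_loop N hN (K - 1).toNat
      rw [show (1 + (((K - 1).toNat : Nat) : Int)) = K by omega] at hB
      by_cases hKN : K ≤ N
      · have hA := pvA_all_loop N (K - 1).toNat (by omega)
        rw [show (1 + (((K - 1).toNat : Nat) : Int)) = K by omega] at hA
        rw [if_pos ⟨hK2, hKN⟩, hA, hB]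
      · have hA1 := pvA_all_loop N (N - 1).toNat (by omega)
        rw [show (1 + (((N - 1).toNat : Nat) : Int)) = N by omega] at hA1
        have hA2 := pvA_win_loop N hN (N - 1).toNat (by omega) (K - N).toNat
        rw [show (N + (((K - N).toNat : Nat) : Int)) = K by omega] at hA2
        rw [if_neg (by omega : ¬((2 : Int) ≤ K ∧ K ≤ N)), hA1, hA2, hB,
          show (N - 1).toNat + (K - N).toNat = (K - 1).toNat by omega]
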